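-- pv_equiv track=rewrite | github.com/haskiindahouse/realtime-pulse-and-respiratory-rate-detection | graphicanalyze.py | localExtremuses
-- ===== SOURCE A (Python) =====
-- def lEMax(dt, startValue, endValue):
--     lMax = dt[startValue]
--     index = startValue
--     for i in range(startValue, endValue):
--         if dt[i] > lMax:
--             index = i
--             lMax = dt[i]
--     return index
--
-- def lEMin(dt, startValue, endValue):
--     lMin = dt[startValue]
--     index = startValue
--     for i in range(startValue, endValue):
--         if dt[i] < lMin:
--             index = i
--             lMin = dt[i]
--     return index
--
-- def localExtremuses(dt, controlValueMAX, controlValueMIN):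
--     startValue = 0
--     endValue = 50
--     resultMAX = []
--     resultMIN = []
--     while endValue < len(dt):
--         indexMAX = int(lEMax(dt, startValue, endValue))
--         indexMIN = int(lEMin(dt, startValue, endValue))
--         currentMIN = dt[indexMIN]
--         currentMAX = dt[indexMAX]
--         if currentMAX > controlValueMAX:
--             resultMAX.append(indexMAX)
--         if currentMIN < controlValueMIN:
--             resultMIN.append(indexMIN)
--         startValue = endValue
--         endValue += 20
--     return list(set(resultMAX)), list(set(resultMIN))
--
-- i = 0
-- ===== SOURCE B (Python) =====
-- def localExtremuses(dt, controlValueMAX, controlValueMIN):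
--     resultMAX = []
--     resultMIN = []
--     startValue = 0
--     endValue = 50
--     maxVal = maxIdx = minVal = minIdx = 0
--     for i, v in enumerate(dt):
--         if i == endValue:
--             if maxVal > controlValueMAX:
--                 resultMAX.append(maxIdx)
--             if minVal < controlValueMIN:
--                 resultMIN.append(minIdx)
--             startValue = endValue
--             endValue += 20
--         if i == startValue:
--             maxVal = minVal = v
--             maxIdx = minIdx = i
--         else:
--             if v > maxVal:
--                 maxVal, maxIdx = v, i
--             if v < minVal:
--                 minVal, minIdx = v, i
--     return list(set(resultMAX)), list(set(resultMIN))
-- ===== Notes on version B (the rewrite author's own statement) =====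
-- stated objective: alternative
-- what changed: Replaces A's outer while-loop that calls two helper arg-max/arg-min index scans per window by a single streaming pass over enumerate(dt) that maintains running max/min trackers and flushes them into the result lists when the index hits a window boundary.
import Mathlib
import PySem

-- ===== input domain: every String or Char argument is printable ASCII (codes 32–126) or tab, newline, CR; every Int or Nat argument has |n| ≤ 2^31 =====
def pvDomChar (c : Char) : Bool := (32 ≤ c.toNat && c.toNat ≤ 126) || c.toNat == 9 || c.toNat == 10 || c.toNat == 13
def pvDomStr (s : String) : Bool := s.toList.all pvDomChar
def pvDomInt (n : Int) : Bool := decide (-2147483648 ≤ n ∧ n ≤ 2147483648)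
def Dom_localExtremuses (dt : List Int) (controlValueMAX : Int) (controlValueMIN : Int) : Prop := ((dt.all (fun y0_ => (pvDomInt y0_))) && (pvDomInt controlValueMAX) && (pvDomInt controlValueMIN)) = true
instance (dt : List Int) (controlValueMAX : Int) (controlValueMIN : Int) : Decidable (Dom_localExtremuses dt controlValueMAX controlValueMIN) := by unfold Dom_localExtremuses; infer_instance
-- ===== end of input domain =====

-- B replaces A's outer window loop (two helper arg-max/arg-min scans per window) by a single
-- streaming pass over enumerate(dt) that keeps running max/min trackers and flushes them at
-- each window boundary (an 'alternative' decomposition, same asymptotic cost).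
-- The two list(set(...)) results are built with PySem.Set in both ports.

-- ===== PORT A =====

-- A's lEMax: running (lMax, index) pair over range(startValue, endValue).
-- dt[...] is ported with the total pyGetD (default 0): every call made by localExtremuses
-- has startValue/endValue inside [0, len(dt)), so the default is never used (exact there).
def lEMax (dt : List Int) (startValue endValue : Int) : Int :=
  ((PySem.List.pyRange startValue endValue).foldl
    (fun (st : Int × Int) i =>
      if PySem.List.pyGetD dt i 0 > st.1 then (PySem.List.pyGetD dt i 0, i) else st)
    (PySem.List.pyGetD dt startValue 0, startValue)).2

def lEMin (dt : List Int) (startValue endValue : Int) : Int :=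
  ((PySem.List.pyRange startValue endValue).foldl
    (fun (st : Int × Int) i =>
      if PySem.List.pyGetD dt i 0 < st.1 then (PySem.List.pyGetD dt i 0, i) else st)
    (PySem.List.pyGetD dt startValue 0, startValue)).2

-- A's while-loop; int(...) on an int is the identity and is dropped.
def localExtremusesLoop (dt : List Int) (controlValueMAX controlValueMIN : Int)
    (startValue endValue : Int) (resultMAX resultMIN : List Int) : List Int × List Int :=
  if _h : endValue < (dt.length : Int) then
    let indexMAX := lEMax dt startValue endValue
    let indexMIN := lEMin dt startValue endValue
    let currentMIN := PySem.List.pyGetD dt indexMIN 0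
    let currentMAX := PySem.List.pyGetD dt indexMAX 0
    localExtremusesLoop dt controlValueMAX controlValueMIN endValue (endValue + 20)
      (if currentMAX > controlValueMAX then resultMAX ++ [indexMAX] else resultMAX)
      (if currentMIN < controlValueMIN then resultMIN ++ [indexMIN] else resultMIN)
  else
    (PySem.Set.ofList resultMAX, PySem.Set.ofList resultMIN)
termination_by ((dt.length : Int) - endValue).toNat
decreasing_by omega

def localExtremuses (dt : List Int) (controlValueMAX : Int) (controlValueMIN : Int) : List Int × List Int :=
  localExtremusesLoop dt controlValueMAX controlValueMIN 0 50 [] []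

-- ===== PORT B =====

-- B's loop state: result lists, current window [sv, ev), running max (mv at index mi)
-- and running min (nv at index ni) of the current window.
structure BSt where
  rM : List Int
  rm : List Int
  sv : Int
  ev : Int
  mv : Int
  mi : Int
  nv : Int
  ni : Int
deriving Repr, DecidableEq

-- one iteration of B's 'for i, v in enumerate(dt)' body
def bStep (cmax cmin : Int) (st : BSt) (p : Int × Int) : BSt :=
  let st1 := if p.1 == st.ev then
      { st with rM := if st.mv > cmax then st.rM ++ [st.mi] else st.rM,
                rm := if st.nv < cmin then st.rm ++ [st.ni] else st.rm,
                sv := st.ev, ev := st.ev + 20 }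
    else st
  if p.1 == st1.sv then
    { st1 with mv := p.2, mi := p.1, nv := p.2, ni := p.1 }
  else
    let st2 := if p.2 > st1.mv then { st1 with mv := p.2, mi := p.1 } else st1
    if p.2 < st2.nv then { st2 with nv := p.2, ni := p.1 } else st2

def localExtremuses_alt (dt : List Int) (controlValueMAX : Int) (controlValueMIN : Int) : List Int × List Int :=
  let fin := (PySem.List.enumerate dt 0).foldl (bStep controlValueMAX controlValueMIN)
    ⟨[], [], 0, 50, 0, 0, 0, 0⟩
  (PySem.Set.ofList fin.rM, PySem.Set.ofList fin.rm)

-- ===== PRECONDITION & SPEC =====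
def Spec_localExtremuses (dt : List Int) (controlValueMAX : Int) (controlValueMIN : Int) (out : List Int × List Int) : Prop := out = localExtremuses_alt dt controlValueMAX controlValueMIN
instance (dt : List Int) (controlValueMAX : Int) (controlValueMIN : Int) (out : List Int × List Int) : Decidable (Spec_localExtremuses dt controlValueMAX controlValueMIN out) := by unfold Spec_localExtremuses; infer_instance

-- ===== CLAIM (what is proved, stated in full; the proofs are below) =====
def Claim_equal_localExtremuses : Prop := ∀ (dt : List Int) (controlValueMAX : Int) (controlValueMIN : Int), Dom_localExtremuses dt controlValueMAX controlValueMIN → Spec_localExtremuses dt controlValueMAX controlValueMIN (localExtremuses dt controlValueMAX controlValueMIN)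

-- ===== LEMMAS AND PROOFS =====

-- B's step specialised to index j carrying value dt[j] (what the enumerate fold does).
def cStep (dt : List Int) (cmax cmin : Int) (st : BSt) (j : Int) : BSt :=
  bStep cmax cmin st (j, PySem.List.pyGetD dt j 0)

-- A's running-max / running-min folds over a list of indices.
def maxFold (dt : List Int) (l : List Int) (p : Int × Int) : Int × Int :=
  l.foldl (fun st i => if PySem.List.pyGetD dt i 0 > st.1 then (PySem.List.pyGetD dt i 0, i) else st) p

def minFold (dt : List Int) (l : List Int) (p : Int × Int) : Int × Int :=
  l.foldl (fun st i => if PySem.List.pyGetD dt i 0 < st.1 then (PySem.List.pyGetD dt i 0, i) else st) p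

-- invariant: the value component of the running fold is dt[index component]
theorem maxFold_val (dt : List Int) (l : List Int) : ∀ p : Int × Int,
    p.1 = PySem.List.pyGetD dt p.2 0 → (maxFold dt l p).1 = PySem.List.pyGetD dt (maxFold dt l p).2 0 := by
  induction l with
  | nil => intro p h; simpa [maxFold] using h
  | cons a l ih =>
    intro p h
    simp only [maxFold, List.foldl_cons]
    by_cases hc : PySem.List.pyGetD dt a 0 > p.1
    · rw [if_pos hc]; exact ih _ rfl
    · rw [if_neg hc]; exact ih _ h

theorem minFold_val (dt : List Int) (l : List Int) : ∀ p : Int × Int,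
    p.1 = PySem.List.pyGetD dt p.2 0 → (minFold dt l p).1 = PySem.List.pyGetD dt (minFold dt l p).2 0 := by
  induction l with
  | nil => intro p h; simpa [minFold] using h
  | cons a l ih =>
    intro p h
    simp only [minFold, List.foldl_cons]
    by_cases hc : PySem.List.pyGetD dt a 0 < p.1
    · rw [if_pos hc]; exact ih _ rfl
    · rw [if_neg hc]; exact ih _ h

-- no index reaches the boundary ⇒ the fold never flushes: results and window unchanged
theorem noflush_step (dt : List Int) (cmax cmin : Int) (st : BSt) (a : Int) (ha : a < st.ev) :
    (cStep dt cmax cmin st a).rM = st.rM ∧ (cStep dt cmax cmin st a).rm = st.rm ∧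
      (cStep dt cmax cmin st a).ev = st.ev := by
  have hne : (a == st.ev) = false := by simp; omega
  unfold cStep bStep
  simp only [hne, Bool.false_eq_true, if_false]
  split_ifs <;> exact ⟨rfl, rfl, rfl⟩

theorem noflush (dt : List Int) (cmax cmin : Int) (l : List Int) : ∀ st : BSt,
    (∀ j ∈ l, j < st.ev) →
    ((l.foldl (cStep dt cmax cmin) st).rM = st.rM ∧ (l.foldl (cStep dt cmax cmin) st).rm = st.rm) := by
  induction l with
  | nil => intro st _; exact ⟨rfl, rfl⟩
  | cons a l ih =>
    intro st h
    obtain ⟨h1, h2, h3⟩ := noflush_step dt cmax cmin st a (h a (List.mem_cons_self))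
    have hrest := ih (cStep dt cmax cmin st a)
      (by intro j hj; rw [h3]; exact h j (List.mem_cons_of_mem _ hj))
    simp only [List.foldl_cons]
    exact ⟨hrest.1.trans h1, hrest.2.trans h2⟩

-- window interior: strictly between sv and ev the step only updates the trackers
theorem compareSeg_step (dt : List Int) (cmax cmin : Int) (st : BSt) (a : Int)
    (h1 : st.sv < a) (h2 : a < st.ev) :
    cStep dt cmax cmin st a =
      { st with
        mv := if PySem.List.pyGetD dt a 0 > st.mv then PySem.List.pyGetD dt a 0 else st.mv,
        mi := if PySem.List.pyGetD dt a 0 > st.mv then a else st.mi,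
        nv := if PySem.List.pyGetD dt a 0 < st.nv then PySem.List.pyGetD dt a 0 else st.nv,
        ni := if PySem.List.pyGetD dt a 0 < st.nv then a else st.ni } := by
  have hne : (a == st.ev) = false := by rw [beq_eq_false_iff_ne]; omega
  have hns : (a == st.sv) = false := by rw [beq_eq_false_iff_ne]; omega
  unfold cStep bStep
  simp only [hne, hns, Bool.false_eq_true, if_false]
  split_ifs <;> rfl

theorem compareSeg (dt : List Int) (cmax cmin : Int) (l : List Int) : ∀ st : BSt,
    (∀ j ∈ l, st.sv < j ∧ j < st.ev) →
    l.foldl (cStep dt cmax cmin) st =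
      { st with mv := (maxFold dt l (st.mv, st.mi)).1, mi := (maxFold dt l (st.mv, st.mi)).2,
                nv := (minFold dt l (st.nv, st.ni)).1, ni := (minFold dt l (st.nv, st.ni)).2 } := by
  induction l with
  | nil => intro st _; simp [maxFold, minFold]
  | cons a l ih =>
    intro st h
    obtain ⟨ha1, ha2⟩ := h a (List.mem_cons_self)
    simp only [List.foldl_cons]
    rw [compareSeg_step dt cmax cmin st a ha1 ha2]
    rw [ih _ (by intro j hj; exact h j (List.mem_cons_of_mem _ hj))]
    simp only [maxFold, minFold, List.foldl_cons]
    by_cases hc : PySem.List.pyGetD dt a 0 > st.mv <;>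
      by_cases hd : PySem.List.pyGetD dt a 0 < st.nv <;>
      simp [hc, hd]

-- one full window [s, e): seed at s then interior comparisons = A's two folds
theorem windowSeg (dt : List Int) (cmax cmin : Int) (s e : Int)
    (rM rm : List Int) (mv mi nv ni : Int) (hse : s < e) :
    (PySem.List.pyRange s e 1).foldl (cStep dt cmax cmin) ⟨rM, rm, s, e, mv, mi, nv, ni⟩ =
      ⟨rM, rm, s, e,
        (maxFold dt (PySem.List.pyRange (s+1) e 1) (PySem.List.pyGetD dt s 0, s)).1,
        (maxFold dt (PySem.List.pyRange (s+1) e 1) (PySem.List.pyGetD dt s 0, s)).2,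
        (minFold dt (PySem.List.pyRange (s+1) e 1) (PySem.List.pyGetD dt s 0, s)).1,
        (minFold dt (PySem.List.pyRange (s+1) e 1) (PySem.List.pyGetD dt s 0, s)).2⟩ := by
  rw [PySem.List.pyRange_one_cons hse]
  simp only [List.foldl_cons]
  have hseed : cStep dt cmax cmin ⟨rM, rm, s, e, mv, mi, nv, ni⟩ s =
      ⟨rM, rm, s, e, PySem.List.pyGetD dt s 0, s, PySem.List.pyGetD dt s 0, s⟩ := by
    have hne : (s == e) = false := by rw [beq_eq_false_iff_ne]; omega
    unfold cStep bStep
    simp [hne]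
  rw [hseed]
  rw [compareSeg dt cmax cmin _ _
    (by intro j hj; obtain ⟨hj1, hj2⟩ := (PySem.List.mem_pyRange_one).mp hj
        exact ⟨show s < j by omega, show j < e from hj2⟩)]

-- A's fold over range(s, e) from seed (dt[s], s): the first step (i = s) is a no-op
theorem aFold_head_max (dt : List Int) (s e : Int) (hse : s < e) :
    maxFold dt (PySem.List.pyRange s e 1) (PySem.List.pyGetD dt s 0, s)
      = maxFold dt (PySem.List.pyRange (s+1) e 1) (PySem.List.pyGetD dt s 0, s) := by
  rw [PySem.List.pyRange_one_cons hse]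
  simp [maxFold]

theorem aFold_head_min (dt : List Int) (s e : Int) (hse : s < e) :
    minFold dt (PySem.List.pyRange s e 1) (PySem.List.pyGetD dt s 0, s)
      = minFold dt (PySem.List.pyRange (s+1) e 1) (PySem.List.pyGetD dt s 0, s) := by
  rw [PySem.List.pyRange_one_cons hse]
  simp [minFold]

-- the main correspondence: B's stream over indices [s, len) = A's window loop
theorem stream_eq (dt : List Int) (cmax cmin : Int) :
    ∀ (fuel : Nat) (e s : Int) (rM rm : List Int) (mv mi nv ni : Int),
      ((dt.length : Int) - e).toNat ≤ fuel → 0 ≤ s → s < e →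
      (PySem.Set.ofList ((PySem.List.pyRange s (dt.length : Int) 1).foldl (cStep dt cmax cmin)
          ⟨rM, rm, s, e, mv, mi, nv, ni⟩).rM,
       PySem.Set.ofList ((PySem.List.pyRange s (dt.length : Int) 1).foldl (cStep dt cmax cmin)
          ⟨rM, rm, s, e, mv, mi, nv, ni⟩).rm)
        = localExtremusesLoop dt cmax cmin s e rM rm := by
  intro fuel
  induction fuel with
  | zero =>
    intro e s rM rm mv mi nv ni hf h0 hse
    have he : (dt.length : Int) ≤ e := by omega
    rw [localExtremusesLoop, dif_neg (not_lt.mpr he)]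
    obtain ⟨h1, h2⟩ := noflush dt cmax cmin (PySem.List.pyRange s (dt.length : Int) 1)
      ⟨rM, rm, s, e, mv, mi, nv, ni⟩
      (by intro j hj; obtain ⟨_, hj2⟩ := (PySem.List.mem_pyRange_one).mp hj; show j < e; omega)
    rw [h1, h2]
  | succ n ih =>
    intro e s rM rm mv mi nv ni hf h0 hse
    by_cases he : e < (dt.length : Int)
    · rw [PySem.List.pyRange_one_append s e (dt.length : Int) (le_of_lt hse) (le_of_lt he),
        List.foldl_append]
      rw [windowSeg dt cmax cmin s e rM rm mv mi nv ni hse]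
      set Mf := maxFold dt (PySem.List.pyRange (s+1) e 1) (PySem.List.pyGetD dt s 0, s) with hMf
      set Nf := minFold dt (PySem.List.pyRange (s+1) e 1) (PySem.List.pyGetD dt s 0, s) with hNf
      set rM' := if Mf.1 > cmax then rM ++ [Mf.2] else rM with hrM'
      set rm' := if Nf.1 < cmin then rm ++ [Nf.2] else rm with hrm'
      have hswap : (PySem.List.pyRange e (dt.length : Int) 1).foldl (cStep dt cmax cmin)
            ⟨rM, rm, s, e, Mf.1, Mf.2, Nf.1, Nf.2⟩
          = (PySem.List.pyRange e (dt.length : Int) 1).foldl (cStep dt cmax cmin)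
            ⟨rM', rm', e, e + 20, Mf.1, Mf.2, Nf.1, Nf.2⟩ := by
        rw [PySem.List.pyRange_one_cons he]
        simp only [List.foldl_cons]
        congr 1
        have h1 : (e == e + 20) = false := by rw [beq_eq_false_iff_ne]; omega
        unfold cStep bStep
        simp [h1]
        exact ⟨hrM'.symm, hrm'.symm⟩
      rw [hswap, ih (e + 20) e rM' rm' Mf.1 Mf.2 Nf.1 Nf.2 (by omega) (by omega) (by omega)]
      -- A side
      conv_rhs => rw [localExtremusesLoop]
      rw [dif_pos he]
      have hmax : maxFold dt (PySem.List.pyRange s e 1) (PySem.List.pyGetD dt s 0, s) = Mf :=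
        aFold_head_max dt s e hse
      have hmin : minFold dt (PySem.List.pyRange s e 1) (PySem.List.pyGetD dt s 0, s) = Nf :=
        aFold_head_min dt s e hse
      have hlemax : lEMax dt s e = Mf.2 := by rw [lEMax, ← hmax]; rfl
      have hlemin : lEMin dt s e = Nf.2 := by rw [lEMin, ← hmin]; rfl
      have hvmax : PySem.List.pyGetD dt Mf.2 0 = Mf.1 := by
        rw [hMf]
        exact (maxFold_val dt (PySem.List.pyRange (s+1) e 1) (PySem.List.pyGetD dt s 0, s) rfl).symm
      have hvmin : PySem.List.pyGetD dt Nf.2 0 = Nf.1 := by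
        rw [hNf]
        exact (minFold_val dt (PySem.List.pyRange (s+1) e 1) (PySem.List.pyGetD dt s 0, s) rfl).symm
      simp only [hlemax, hlemin, hvmax, hvmin]
      rw [hrM', hrm']
    · have he' : (dt.length : Int) ≤ e := not_lt.mp he
      rw [localExtremusesLoop, dif_neg he]
      obtain ⟨h1, h2⟩ := noflush dt cmax cmin (PySem.List.pyRange s (dt.length : Int) 1)
        ⟨rM, rm, s, e, mv, mi, nv, ni⟩
        (by intro j hj; obtain ⟨_, hj2⟩ := (PySem.List.mem_pyRange_one).mp hj; show j < e; omega)
      rw [h1, h2]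

-- ===== VERDICT (by name: the statement is the Claim_ definition above) =====
theorem localExtremuses_spec : Claim_equal_localExtremuses := by
  unfold Claim_equal_localExtremuses
  intro dt cmax cmin _hdom
  unfold Spec_localExtremuses localExtremuses localExtremuses_alt
  rw [PySem.List.enumerate_eq_map_pyRange dt 0, List.foldl_map]
  exact (stream_eq dt cmax cmin (((dt.length : Int) - 50).toNat) 50 0 [] [] 0 0 0 0 le_rfl le_rfl (by norm_num)).symm
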